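-- pv_equiv track=rewrite | github.com/Jonkua/mdna-extractionv2-table-issues | src/parsers/table_parser.py | _find_column_boundaries
-- ===== SOURCE A (Python) =====
-- from typing import List, Dict, Tuple, Optional, Set
--
-- def _find_column_boundaries(header: str) -> List[Tuple[int, int]]:
--     """Find column boundaries in header line."""
--     # Look for transitions between text and spaces
--     boundaries = []
--     in_text = False
--     start = 0
--
--     for i, char in enumerate(header + ' '):
--         if char != ' ' and not in_text:
--             start = i
--             in_text = True
--         elif char == ' ' and in_text:
--             # Check if we've hit a column boundary (multiple spaces)
--             spaces_ahead = 0
--             j = i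
--             while j < len(header) and header[j] == ' ':
--                 spaces_ahead += 1
--                 j += 1
--
--             if spaces_ahead >= 2 or j >= len(header):
--                 boundaries.append((start, i))
--                 in_text = False
--
--     return boundaries
-- ===== SOURCE B (Python) =====
-- def _find_column_boundaries(header):
--     """Find column boundaries: tokenize maximal non-space runs, then merge runs
--     separated by exactly one space (a single interior space stays inside a column)."""
--     tokens = []
--     cur = None
--     for i, ch in enumerate(header):
--         if ch != ' ':
--             if cur is None:
--                 cur = i
--         else:
--             if cur is not None:
--                 tokens.append((cur, i))
--                 cur = None
--     if cur is not None:
--         tokens.append((cur, len(header)))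
--     merged = []
--     for s, e in tokens:
--         if merged and s - merged[-1][1] == 1:
--             merged[-1] = (merged[-1][0], e)
--         else:
--             merged.append((s, e))
--     return merged
-- ===== Notes on version B (the rewrite author's own statement) =====
-- stated objective: alternative
-- what changed: Replaces A's single-pass text/space state machine with an inner space-counting lookahead by a two-phase pipeline: first collect maximal non-space runs as (start,end) tokens, then merge adjacent tokens separated by exactly one space.
import Mathlib
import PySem

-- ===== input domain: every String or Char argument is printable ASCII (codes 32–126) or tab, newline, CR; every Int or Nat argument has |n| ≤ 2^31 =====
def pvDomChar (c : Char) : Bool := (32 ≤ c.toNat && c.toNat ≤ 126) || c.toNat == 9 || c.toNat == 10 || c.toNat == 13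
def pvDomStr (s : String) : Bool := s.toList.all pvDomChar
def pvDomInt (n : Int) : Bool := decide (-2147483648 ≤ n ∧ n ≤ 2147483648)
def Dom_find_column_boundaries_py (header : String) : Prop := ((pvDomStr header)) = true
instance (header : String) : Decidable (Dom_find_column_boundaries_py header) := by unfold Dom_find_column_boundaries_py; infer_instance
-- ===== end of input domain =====

-- B replaces A's one-pass state machine (with an inner space-count lookahead) by a two-phase
-- tokenize-then-merge pipeline; same cost, alternative structure. Return values are identical.

-- ===== PORT A =====
-- inner `while j < len(header) and header[j] == ' '` loop: counts the leading spaces of a suffix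
def aCount : List Char → Nat
  | [] => 0
  | c :: cs => if c = ' ' then 1 + aCount cs else 0

-- the `for i, char in enumerate(header + ' ')` loop, state (boundaries, in_text, start)
def aLoop (hdr : List Char) : List Char → Nat → List (Int × Int) → Bool → Int → List (Int × Int)
  | [], _, bs, _, _ => bs
  | c :: cs, i, bs, in_text, start =>
    if c ≠ ' ' ∧ in_text = false then
      aLoop hdr cs (i + 1) bs true (i : Int)
    else if c = ' ' ∧ in_text = true then
      let sp := aCount (hdr.drop i)
      let j := i + sp
      if 2 ≤ sp ∨ hdr.length ≤ j then
        aLoop hdr cs (i + 1) (bs ++ [(start, (i : Int))]) false start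
      else
        aLoop hdr cs (i + 1) bs in_text start
    else
      aLoop hdr cs (i + 1) bs in_text start

def find_column_boundaries_py (header : String) : List (Int × Int) :=
  aLoop header.toList (header.toList ++ [' ']) 0 [] false 0

-- ===== PORT B =====
-- phase 1: the `for i, ch in enumerate(header)` loop collecting maximal non-space runs, state (tokens, cur)
def bScanLoop : List Char → Nat → List (Int × Int) → Option Nat → (List (Int × Int) × Option Nat)
  | [], _, toks, cur => (toks, cur)
  | c :: cs, i, toks, cur =>
    if c ≠ ' ' then
      match cur with
      | none => bScanLoop cs (i + 1) toks (some i)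
      | some _ => bScanLoop cs (i + 1) toks cur
    else
      match cur with
      | some s => bScanLoop cs (i + 1) (toks ++ [((s : Int), (i : Int))]) none
      | none => bScanLoop cs (i + 1) toks none

-- phase 2: one step of the merge loop (`merged[-1]` kept at the head: `merged` is built reversed)
def bMergeStep (acc : List (Int × Int)) (t : Int × Int) : List (Int × Int) :=
  match acc with
  | (s0, e0) :: rest => if t.1 - e0 = 1 then (s0, t.2) :: rest else t :: (s0, e0) :: rest
  | [] => [t]

def find_column_boundaries_py_alt (header : String) : List (Int × Int) :=
  let l := header.toList
  let scanned := bScanLoop l 0 [] none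
  let tokens := match scanned.2 with
    | some s => scanned.1 ++ [((s : Int), (l.length : Int))]
    | none => scanned.1
  (tokens.foldl bMergeStep []).reverse

-- ===== PRECONDITION & SPEC =====
def Spec_find_column_boundaries_py (header : String) (out : List (Int × Int)) : Prop := out = find_column_boundaries_py_alt header
instance (header : String) (out : List (Int × Int)) : Decidable (Spec_find_column_boundaries_py header out) := by unfold Spec_find_column_boundaries_py; infer_instance

-- ===== CLAIM (what is proved, stated in full; the proofs are below) =====
def Claim_equal_find_column_boundaries_py : Prop := ∀ (header : String), Dom_find_column_boundaries_py header → Spec_find_column_boundaries_py header (find_column_boundaries_py header)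

-- ===== LEMMAS AND PROOFS =====

-- index-free restatement of A's loop: state = optional open-column start
def specA : List Char → Nat → Option Int → List (Int × Int)
  | [], _, none => []
  | [], i, some s => [(s, (i : Int))]
  | c :: cs, i, none =>
    if c = ' ' then specA cs (i + 1) none else specA cs (i + 1) (some (i : Int))
  | c :: cs, i, some s =>
    if c = ' ' then
      if 1 ≤ aCount cs ∨ cs.length ≤ aCount cs then (s, (i : Int)) :: specA cs (i + 1) none
      else specA cs (i + 1) (some s)
    else specA cs (i + 1) (some s)

-- recursive form of B's tokenizer (emitted head-first, final token closed at end of input)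
def tScan : List Char → Nat → Option Int → List (Int × Int)
  | [], _, none => []
  | [], i, some s => [(s, (i : Int))]
  | c :: cs, i, none =>
    if c = ' ' then tScan cs (i + 1) none else tScan cs (i + 1) (some (i : Int))
  | c :: cs, i, some s =>
    if c = ' ' then (s, (i : Int)) :: tScan cs (i + 1) none else tScan cs (i + 1) (some s)

-- recursive form of B's merge loop
def tMerge : List (Int × Int) → List (Int × Int)
  | [] => []
  | [t] => [t]
  | (s1, e1) :: (s2, e2) :: rest =>
    if s2 - e1 = 1 then tMerge ((s1, e2) :: rest) else (s1, e1) :: tMerge ((s2, e2) :: rest)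

theorem aLoop_eq_specA (hdr : List Char) :
    ∀ (rest : List Char) (i : Nat) (bs : List (Int × Int)) (in_text : Bool) (start : Int),
      hdr.drop i = rest → i + rest.length = hdr.length →
      aLoop hdr (rest ++ [' ']) i bs in_text start
        = bs ++ specA rest i (if in_text then some start else none) := by
  intro rest
  induction rest with
  | nil =>
    intro i bs in_text start hd hl
    cases in_text with
    | false => simp [aLoop, specA]
    | true =>
      simp only [List.nil_append, aLoop, hd]
      rw [if_neg (by simp), if_pos ⟨trivial, trivial⟩,
        if_pos (Or.inr (by simp [aCount]; simp at hl; omega))]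
      simp [specA]
  | cons c cs ih =>
    intro i bs in_text start hd hl
    have hd' : hdr.drop (i + 1) = cs := by
      rw [← List.tail_drop, hd]
      rfl
    have hl' : (i + 1) + cs.length = hdr.length := by
      simp at hl; omega
    by_cases hc : c = ' '
    · cases in_text with
      | false =>
        subst hc
        simp only [List.cons_append, aLoop]
        rw [if_neg (by simp), if_neg (by simp)]
        rw [ih (i + 1) bs false start hd' hl']
        simp [specA]
      | true =>
        subst hc
        simp only [List.cons_append, aLoop, hd]
        rw [if_neg (by simp), if_pos ⟨trivial, trivial⟩]
        have hcount : aCount (' ' :: cs) = 1 + aCount cs := by simp [aCount]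
        by_cases hcond : 1 ≤ aCount cs ∨ cs.length ≤ aCount cs
        · rw [if_pos (by rw [hcount]; simp at hl; omega)]
          rw [ih (i + 1) (bs ++ [(start, (i : Int))]) false start hd' hl']
          simp [specA, hcond]
        · rw [if_neg (by rw [hcount]; simp at hl; omega)]
          rw [ih (i + 1) bs true start hd' hl']
          simp [specA, hcond]
    · cases in_text with
      | false =>
        simp only [List.cons_append, aLoop]
        rw [if_pos ⟨hc, trivial⟩]
        rw [ih (i + 1) bs true (i : Int) hd' hl']
        simp [specA, hc]
      | true =>
        simp only [List.cons_append, aLoop]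
        rw [if_neg (by simp), if_neg (by simp [hc])]
        rw [ih (i + 1) bs true start hd' hl']
        simp [specA, hc]

theorem tScan_some_shape :
    ∀ (l : List Char) (i : Nat) (a : Int), ∃ e r,
      tScan l i (some a) = (a, e) :: r ∧ ∀ b : Int, tScan l i (some b) = (b, e) :: r := by
  intro l
  induction l with
  | nil => exact fun i a => ⟨(i : Int), [], rfl, fun b => rfl⟩
  | cons c cs ih =>
    intro i a
    by_cases hc : c = ' '
    · exact ⟨(i : Int), tScan cs (i + 1) none, by simp [tScan, hc], fun b => by simp [tScan, hc]⟩
    · obtain ⟨e, r, h1, h2⟩ := ih (i + 1) a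
      exact ⟨e, r, by simp [tScan, hc, h1], fun b => by simp [tScan, hc, h2 b]⟩

theorem tScan_first_start :
    ∀ (l : List Char) (i : Nat), ∀ a b r, tScan l i none = ((a, b) :: r) → (i : Int) ≤ a := by
  intro l
  induction l with
  | nil => intro i a b r h; simp [tScan] at h
  | cons c cs ih =>
    intro i a b r h
    by_cases hc : c = ' '
    · simp only [tScan, hc, reduceIte] at h
      have := ih (i + 1) a b r (by simpa [hc] using h)
      omega
    · obtain ⟨e, r', h1, _⟩ := tScan_some_shape cs (i + 1) ((i : Nat) : Int)
      simp only [tScan, hc, reduceIte, h1] at h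
      have : ((i : Nat) : Int) = a := (Prod.mk.injEq _ _ _ _).mp (List.cons.injEq _ _ _ _ ▸ h).1 |>.1
      omega

theorem tMerge_cons_of_far (s : Int) (e : Int) (T : List (Int × Int))
    (h : ∀ a b r, T = (a, b) :: r → a - e ≠ 1) :
    tMerge ((s, e) :: T) = (s, e) :: tMerge T := by
  cases T with
  | nil => simp [tMerge]
  | cons t r =>
    obtain ⟨a, b⟩ := t
    simp [tMerge, h a b r rfl]

theorem specA_eq_merge_scan :
    ∀ (l : List Char) (i : Nat) (cur : Option Int),
      specA l i cur = tMerge (tScan l i cur) := by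
  intro l
  induction l with
  | nil =>
    intro i cur
    cases cur with
    | none => simp [specA, tScan, tMerge]
    | some s => simp [specA, tScan, tMerge]
  | cons c cs ih =>
    intro i cur
    cases cur with
    | none =>
      by_cases hc : c = ' '
      · simp [specA, tScan, hc, ih]
      · simp [specA, tScan, hc, ih]
    | some s =>
      by_cases hc : c = ' '
      · -- space while a column is open
        cases cs with
        | nil =>
          simp [specA, tScan, tMerge, hc, aCount]
        | cons d cs' =>
          by_cases hd : d = ' '
          · -- next char is a space: the column closes
            have hcond : 1 ≤ aCount (d :: cs') ∨ (d :: cs').length ≤ aCount (d :: cs') := by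
              left; simp [aCount, hd]
            have eA : specA (c :: d :: cs') i (some s)
                = (s, (i : Int)) :: specA (d :: cs') (i + 1) none := by
              subst hc
              conv_lhs => rw [specA]
              rw [if_pos rfl, if_pos hcond]
            have eT : tScan (c :: d :: cs') i (some s)
                = (s, (i : Int)) :: tScan (d :: cs') (i + 1) none := by
              subst hc
              conv_lhs => rw [tScan]
              rw [if_pos rfl]
            rw [eA, eT, ih (i + 1) none, tMerge_cons_of_far]
            intro a b r h
            have ha := tScan_first_start cs' (i + 1 + 1) a b r (by
              simpa [tScan, hd] using h)
            omega
          · -- single space followed by text: the column continues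
            have hcond : ¬ (1 ≤ aCount (d :: cs') ∨ (d :: cs').length ≤ aCount (d :: cs')) := by
              simp [aCount, hd]
            obtain ⟨e, r, h1, h2⟩ := tScan_some_shape cs' (i + 1 + 1) (((i + 1 : Nat)) : Int)
            have eA : specA (c :: d :: cs') i (some s) = specA (d :: cs') (i + 1) (some s) := by
              subst hc
              conv_lhs => rw [specA]
              rw [if_pos rfl, if_neg hcond]
            have eT2 : tScan (d :: cs') (i + 1) (some s) = tScan cs' (i + 1 + 1) (some s) := by
              conv_lhs => rw [tScan]
              rw [if_neg hd]
            have eT : tScan (c :: d :: cs') i (some s)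
                = (s, (i : Int)) :: tScan cs' (i + 1 + 1) (some ((i + 1 : Nat) : Int)) := by
              subst hc
              conv_lhs => rw [tScan]
              rw [if_pos rfl]
              conv_lhs => rw [tScan]
              rw [if_neg hd]
            rw [eA, ih (i + 1) (some s), eT2, h2 s, eT, h1]
            simp only [tMerge]
            rw [if_pos (by push_cast; ring)]
      · simp [specA, tScan, hc, ih]

theorem bScan_eq_tScan :
    ∀ (l : List Char) (i : Nat) (toks : List (Int × Int)) (cur : Option Nat) (fin : Nat),
      fin = i + l.length →
      (match (bScanLoop l i toks cur).2 with
        | some s => (bScanLoop l i toks cur).1 ++ [((s : Int), (fin : Int))]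
        | none => (bScanLoop l i toks cur).1)
        = toks ++ tScan l i (cur.map (fun s => (s : Int))) := by
  intro l
  induction l with
  | nil =>
    intro i toks cur fin hfin
    cases cur with
    | none => simp [bScanLoop, tScan]
    | some s => simp [bScanLoop, tScan, hfin]
  | cons c cs ih =>
    intro i toks cur fin hfin
    have hfin' : fin = (i + 1) + cs.length := by simp at hfin; omega
    by_cases hc : c = ' '
    · subst hc
      cases cur with
      | none =>
        simp only [bScanLoop]
        rw [if_neg (by simp)]
        rw [ih (i + 1) toks none fin hfin']
        simp [tScan]
      | some s =>
        simp only [bScanLoop]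
        rw [if_neg (by simp)]
        rw [ih (i + 1) (toks ++ [((s : Int), (i : Int))]) none fin hfin']
        simp [tScan]
    · cases cur with
      | none =>
        simp only [bScanLoop]
        rw [if_pos hc]
        rw [ih (i + 1) toks (some i) fin hfin']
        simp [tScan, hc]
      | some s =>
        simp only [bScanLoop]
        rw [if_pos hc]
        rw [ih (i + 1) toks (some s) fin hfin']
        simp [tScan, hc]

theorem foldl_merge_acc :
    ∀ (ts : List (Int × Int)) (s0 e0 : Int) (rest : List (Int × Int)),
      (ts.foldl bMergeStep ((s0, e0) :: rest)).reverse = rest.reverse ++ tMerge ((s0, e0) :: ts) := by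
  intro ts
  induction ts with
  | nil => intro s0 e0 rest; simp [tMerge]
  | cons t ts' ih =>
    intro s0 e0 rest
    obtain ⟨s, e⟩ := t
    simp only [List.foldl]
    by_cases hm : s - e0 = 1
    · have hstep : bMergeStep ((s0, e0) :: rest) (s, e) = (s0, e) :: rest := by
        simp [bMergeStep, hm]
      rw [hstep, ih s0 e rest]
      simp only [tMerge]
      rw [if_pos hm]
    · have hstep : bMergeStep ((s0, e0) :: rest) (s, e) = (s, e) :: (s0, e0) :: rest := by
        simp [bMergeStep, hm]
      rw [hstep, ih s e ((s0, e0) :: rest)]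
      simp only [tMerge]
      rw [if_neg hm]
      simp

theorem foldl_merge_eq_tMerge :
    ∀ (ts : List (Int × Int)), (ts.foldl bMergeStep []).reverse = tMerge ts := by
  intro ts
  cases ts with
  | nil => simp [tMerge]
  | cons t ts' =>
    obtain ⟨s, e⟩ := t
    have : List.foldl bMergeStep [] ((s, e) :: ts') = List.foldl bMergeStep [(s, e)] ts' := by
      simp [List.foldl, bMergeStep]
    rw [this]
    simpa using foldl_merge_acc ts' s e []

-- ===== VERDICT (by name: the statement is the Claim_ definition above) =====
theorem find_column_boundaries_py_spec : Claim_equal_find_column_boundaries_py := by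
  intro header _
  unfold Spec_find_column_boundaries_py find_column_boundaries_py find_column_boundaries_py_alt
  rw [aLoop_eq_specA header.toList header.toList 0 [] false 0 rfl (by simp)]
  rw [specA_eq_merge_scan, ← foldl_merge_eq_tMerge]
  have h := bScan_eq_tScan header.toList 0 [] none header.toList.length (by simp)
  simp at h
  dsimp only
  simp only [String.length_toList]
  rw [h]
  simp
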